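/- GENERATED by farm/mkstatement.py from design/units.split.tsv — do not edit.
   THE SPLIT of the proof unit `start_decoder.C3` into `start_decoder.C3a`, `start_decoder.C3b`, `start_decoder.C3c`: the children's statements give the parent's
   UNCHANGED statement (so nothing above the parent — callers, compositions — is touched by the split). -/
import Vorbis.Spec.StartDecoderC3
import Vorbis.Spec.Units.start_decoder_C3
import Vorbis.Spec.Units.start_decoder_C3a
import Vorbis.Spec.Units.start_decoder_C3b
import Vorbis.Spec.Units.start_decoder_C3c
namespace Vorbis.Spec.Splits
open X86 X86.User Asan

/-- The children of the split unit `start_decoder.C3` prove it, by `Vorbis.Spec.StartDecoder.SegC3.of_parts`. -/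
theorem start_decoder_C3
    (h_start_decoder_C3a : Vorbis.Spec.start_decoder_C3a.Statement)
    (h_start_decoder_C3b : Vorbis.Spec.start_decoder_C3b.Statement)
    (h_start_decoder_C3c : Vorbis.Spec.start_decoder_C3c.Statement) :
    Vorbis.Spec.start_decoder_C3.Statement := by
  intro Lay _hLay μ _hμ u₀ _hcode _h_get_bits _h_error _h_memset _h_asan_load4_noabort _h_ilog
  apply Vorbis.Spec.StartDecoder.SegC3.of_parts
  · exact h_start_decoder_C3a Lay _hLay μ _hμ u₀ _hcode _h_get_bits
  · exact h_start_decoder_C3b Lay _hLay μ _hμ u₀ _hcode _h_get_bits _h_error _h_memset _h_asan_load4_noabort _h_ilog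
  · exact h_start_decoder_C3c Lay _hLay μ _hμ u₀ _hcode

end Vorbis.Spec.Splits
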